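-- pv_equiv track=rewrite | github.com/atm1992/LeetCode_in_Python3 | All_Solutions/a473_matchsticks_to_square.py | makesquare_2
-- ===== SOURCE A (Python) =====
-- from typing import List
--
-- def makesquare_2(matchsticks: List[int]) -> bool:
--     """
--     状态压缩 + 动态规划
--     对正方形的4条边进行编号，依次放满每条边，只有当前一条边放满后，才可以放下一条边。
--     状态state表示已使用了哪些火柴，n = len(matchsticks)，总共有2^n种状态，0 表示未使用任何火柴，2^n - 1 表示使用了所有的火柴。
--     dp[s] 表示正方形当前未放满的那条边的长度，当这条边的长度恰好等于total // 4时，就可以放下一条边了，此时dp[s]的值恢复为0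
--     """
--     total = sum(matchsticks)
--     if total % 4 != 0:
--         return False
--     edge = total // 4
--     size = 1 << len(matchsticks)
--     # dp[s] == -1 表示当前状态未计算过 或 当前状态下找不到合适的放置方案；dp[s] == 0 表示该状态下，恰好能放满m条边，m可取0、1、2、3、4。
--     dp = [-1] * size
--     # 未使用任何火柴的状态下，能放满0条边
--     dp[0] = 0
--     # 从状态1遍历到状态2^n - 1
--     for s in range(1, size):
--         # 对于每种状态，都需要遍历所有火柴，找到属于当前状态的火柴，并可将该火柴放入当前未放满的那条边中
--         for idx, num in enumerate(matchsticks):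
--             # 先判断当前火柴是否属于当前状态s
--             if s & (1 << idx) == 0:
--                 continue
--             # 除去当前火柴之外的前一个状态。状态转移：在状态pre_s的基础上，再放入当前火柴，就可得到当前状态s
--             # 一个状态s有多少个状态pre_s，取决于状态s中有多少位1
--             pre_s = s & ~(1 << idx)
--             # 前一个状态需要是可行的，并且放入当前火柴后，长度必须小于等于edge
--             # 因为s > pre_s，所以pre_s肯定已经被计算过了，但若dp[pre_s] == -1，则只能说明状态pre_s下找不到合适的放置方案
--             if dp[pre_s] != -1 and dp[pre_s] + num <= edge:
--                 # 对edge取模的原因：当dp[pre_s] + num == edge时，将dp[s]的值恢复为0，准备放下一条边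
--                 dp[s] = (dp[pre_s] + num) % edge
--                 # 剪枝
--                 # 找到一种符合要求的火柴放置方案后，就不用再继续计算当前状态了。
--                 # 因为题目问的是能否找到一种放置方案，并没要求找到所有的放置方案，所以只要计算得到的当前状态符合要求就行了
--                 break
--     # 使用完所有的火柴之后，需要是恰好放满4条边。
--     return dp[-1] == 0
-- ===== SOURCE B (Python) =====
-- from typing import List
--
-- def makesquare_2(matchsticks: List[int]) -> bool:
--     # DFS backtracking over the four-sides state space, filling one side at a time,
--     # with a memo set of masks already known to fail.
--     total = sum(matchsticks)
--     if total % 4 != 0: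
--         return False
--     edge = total // 4
--     n = len(matchsticks)
--     full = (1 << n) - 1
--     failed = set()
--
--     def dfs(used, cur):
--         if used == full:
--             return True
--         if used in failed:
--             return False
--         for i, m in enumerate(matchsticks):
--             if used & (1 << i) == 0 and cur + m <= edge:
--                 if dfs(used | (1 << i), (cur + m) % edge):
--                     return True
--         failed.add(used)
--         return False
--
--     return dfs(0, 0)
-- ===== Notes on version B (the rewrite author's own statement) =====
-- stated objective: alternative
-- what changed: Replaced the bottom-up bitmask DP (array over all 2^n states, inner scan with break) by top-down DFS backtracking over the used-sticks mask that fills one side at a time, pruned by a memo set of masks known to fail.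
-- outside the precondition, e.g. on makesquare_2([-4, -4, -4]): A returns False, B returns True; on makesquare_2([0, 0]): A raises ZeroDivisionError, B raises ZeroDivisionError
import Mathlib
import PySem

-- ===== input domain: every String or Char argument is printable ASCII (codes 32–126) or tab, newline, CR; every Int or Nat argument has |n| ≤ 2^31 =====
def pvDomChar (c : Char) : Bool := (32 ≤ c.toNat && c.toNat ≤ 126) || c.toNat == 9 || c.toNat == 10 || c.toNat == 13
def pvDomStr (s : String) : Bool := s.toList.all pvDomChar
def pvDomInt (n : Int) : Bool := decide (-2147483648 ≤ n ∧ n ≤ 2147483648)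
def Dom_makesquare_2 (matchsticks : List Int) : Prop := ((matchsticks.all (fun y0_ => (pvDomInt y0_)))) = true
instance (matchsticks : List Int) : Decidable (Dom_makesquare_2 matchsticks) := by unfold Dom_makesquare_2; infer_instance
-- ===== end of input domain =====

-- B replaces A's bottom-up bitmask DP (full 2^n array sweep with a -1 sentinel) by top-down
-- DFS backtracking over the used-sticks mask with a memo set of failed masks (objective: alternative).

-- ===== PORT A =====
-- enumerate(matchsticks): indices are 0..n-1, used only as shift counts; ported with a Nat index (exact).
def pvEnumFrom (k : Nat) : List Int → List (Nat × Int)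
  | [] => []
  | x :: xs => (k, x) :: pvEnumFrom (k + 1) xs

-- the inner 'for idx, num in enumerate(...)' loop with its break: returns the value stored into dp[s]
-- (masks are nonnegative Python ints, ported over Nat; s & ~(1 << idx) = s ^^^ (1 <<< idx) since bit idx is set in s)
def pvInnerA (dp : List Int) (edge : Int) (s : Nat) : List (Nat × Int) → Option Int
  | [] => none
  | (idx, num) :: rest =>
    if s &&& (1 <<< idx) == 0 then pvInnerA dp edge s rest
    else
      if dp[s ^^^ (1 <<< idx)]! ≠ -1 ∧ dp[s ^^^ (1 <<< idx)]! + num ≤ edge then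
        some (PySem.Int.mod (dp[s ^^^ (1 <<< idx)]! + num) edge)
      else pvInnerA dp edge s rest

def makesquare_2 (matchsticks : List Int) : Bool :=
  let total := matchsticks.sum
  if PySem.Int.mod total 4 ≠ 0 then false
  else
    let edge := PySem.Int.floordiv total 4
    let size := 1 <<< matchsticks.length
    let dp0 := (List.replicate size (-1 : Int)).set 0 0
    let dp := (List.range' 1 (size - 1)).foldl
      (fun dp s =>
        match pvInnerA dp edge s (pvEnumFrom 0 matchsticks) with
        | some v => dp.set s v
        | none => dp) dp0
    -- dp[-1] == 0 ; dp is never empty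
    PySem.List.pyGetD dp (-1) 0 == 0

-- ===== PORT B =====
-- dfs(used, cur) with the memo set 'failed' threaded through; the fuel argument only bounds the
-- recursion depth (the mask strictly grows towards full, so fuel = 2^n from the top call suffices).
mutual
def pvDfs (ms : List Int) (edge : Int) (full : Nat) :
    Nat → PySem.Set Nat → Nat → Int → Bool × PySem.Set Nat
  | 0, failed, _, _ => (false, failed)
  | fuel + 1, failed, used, cur =>
    if used == full then (true, failed)
    else if PySem.Set.contains failed used then (false, failed)
    else
      match pvLoop ms edge full fuel failed used cur (pvEnumFrom 0 ms) with
      | (true, failed') => (true, failed')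
      | (false, failed') => (false, PySem.Set.add failed' used)
termination_by fuel failed used cur => (fuel, 0)

def pvLoop (ms : List Int) (edge : Int) (full : Nat) (fuel : Nat) :
    PySem.Set Nat → Nat → Int → List (Nat × Int) → Bool × PySem.Set Nat
  | failed, _, _, [] => (false, failed)
  | failed, used, cur, (i, m) :: rest =>
    if used &&& (1 <<< i) == 0 && decide (cur + m ≤ edge) then
      match pvDfs ms edge full fuel failed (used ||| (1 <<< i)) (PySem.Int.mod (cur + m) edge) with
      | (true, failed') => (true, failed')
      | (false, failed') => pvLoop ms edge full fuel failed' used cur rest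
    else pvLoop ms edge full fuel failed used cur rest
termination_by failed used cur l => (fuel, l.length + 1)
end

def makesquare_2_alt (matchsticks : List Int) : Bool :=
  let total := matchsticks.sum
  if PySem.Int.mod total 4 ≠ 0 then false
  else
    let edge := PySem.Int.floordiv total 4
    let n := matchsticks.length
    let full := (1 <<< n) - 1
    (pvDfs matchsticks edge full (1 <<< n) PySem.Set.empty 0 0).1

-- ===== PRECONDITION & SPEC =====
-- Pre_ excludes nonempty lists whose sum is ≤ 0 yet divisible by 4: with sum 0 both programs raise
-- ZeroDivisionError ('% 0'), and with a negative sum A's -1 sentinel collides with Python's mod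
-- values for a negative edge, an accident of A's implementation (negative sticks are outside the
-- task's natural domain).
def Pre_makesquare_2 (matchsticks : List Int) : Prop :=
  matchsticks = [] ∨ 0 < matchsticks.sum ∨ PySem.Int.mod matchsticks.sum 4 ≠ 0
instance (matchsticks : List Int) : Decidable (Pre_makesquare_2 matchsticks) := by
  unfold Pre_makesquare_2; infer_instance
def pvWitness_makesquare_2 : List Int := [1, 1, 1, 1]

def Spec_makesquare_2 (matchsticks : List Int) (out : Bool) : Prop := out = makesquare_2_alt matchsticks
instance (matchsticks : List Int) (out : Bool) : Decidable (Spec_makesquare_2 matchsticks out) := by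
  unfold Spec_makesquare_2; infer_instance

-- ===== CLAIM (what is proved, stated in full; the proofs are below) =====
def Claim_equal_makesquare_2 : Prop := ∀ (matchsticks : List Int), Dom_makesquare_2 matchsticks → Pre_makesquare_2 matchsticks → Spec_makesquare_2 matchsticks (makesquare_2 matchsticks)

-- ===== LEMMAS AND PROOFS =====

-- sum of the sticks selected by a mask
def pvSum (ms : List Int) (s : Nat) : Int :=
  ∑ i ∈ Finset.range ms.length, if s.testBit i then ms[i]! else 0

-- masks reachable from 0 by filling the sides one at a time (what A's dp records: dp[s] ≠ -1)
inductive PvReach (ms : List Int) (edge : Int) : Nat → Prop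
  | zero : PvReach ms edge 0
  | step {s i : Nat} (hi : i < ms.length) (hb : s.testBit i = false)
      (hr : PvReach ms edge s)
      (hc : PySem.Int.mod (pvSum ms s) edge + ms[i]! ≤ edge) :
      PvReach ms edge (s ||| (1 <<< i))

-- masks from which `full` is reachable (what B's dfs decides)
inductive PvReachF (ms : List Int) (edge : Int) (full : Nat) : Nat → Prop
  | done : PvReachF ms edge full full
  | step {s i : Nat} (hi : i < ms.length) (hb : s.testBit i = false)
      (hc : PySem.Int.mod (pvSum ms s) edge + ms[i]! ≤ edge)
      (hr : PvReachF ms edge full (s ||| (1 <<< i))) : PvReachF ms edge full s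

-- ---- generic bit lemmas ----
theorem pv_shift_eq (i : Nat) : 1 <<< i = 2 ^ i := Nat.one_shiftLeft i

theorem pv_testBit_or_self {s i : Nat} : (s ||| (1 <<< i)).testBit i = true := by
  simp [Nat.testBit_or, pv_shift_eq]

theorem pv_xor_cancel {s i : Nat} (hb : s.testBit i = false) :
    (s ||| (1 <<< i)) ^^^ (1 <<< i) = s := by
  apply Nat.eq_of_testBit_eq
  intro j
  rcases eq_or_ne i j with rfl | h
  · simp [Nat.testBit_or, Nat.testBit_xor, pv_shift_eq, hb]
  · simp [Nat.testBit_or, Nat.testBit_xor, pv_shift_eq, Nat.testBit_two_pow, h]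

theorem pv_or_xor_cancel {s i : Nat} (hb : s.testBit i = true) :
    (s ^^^ (1 <<< i)) ||| (1 <<< i) = s := by
  apply Nat.eq_of_testBit_eq
  intro j
  rcases eq_or_ne i j with rfl | h
  · simp [Nat.testBit_or, Nat.testBit_xor, pv_shift_eq, hb]
  · simp [Nat.testBit_or, Nat.testBit_xor, pv_shift_eq, Nat.testBit_two_pow, h]

theorem pv_xor_testBit {s i : Nat} : (s ^^^ (1 <<< i)).testBit i = (!s.testBit i) := by
  simp [Nat.testBit_xor, pv_shift_eq]

theorem pv_xor_lt {s i : Nat} (hb : s.testBit i = true) : s ^^^ (1 <<< i) < s := by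
  apply Nat.lt_of_testBit i
  · simp [pv_xor_testBit, hb]
  · exact hb
  · intro j hj
    simp [Nat.testBit_xor, pv_shift_eq, Nat.testBit_two_pow, Nat.ne_of_lt hj]

theorem pv_lt_or {s i : Nat} (hb : s.testBit i = false) : s < s ||| (1 <<< i) := by
  apply Nat.lt_of_testBit i hb pv_testBit_or_self
  intro j hj
  simp [Nat.testBit_or, pv_shift_eq, Nat.testBit_two_pow, Nat.ne_of_lt hj]

theorem pv_or_lt_two_pow {s i n : Nat} (hs : s < 2 ^ n) (hi : i < n) :
    s ||| (1 <<< i) < 2 ^ n := by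
  refine Nat.or_lt_two_pow hs ?_
  rw [pv_shift_eq]
  exact Nat.pow_lt_pow_right (by omega) hi

theorem pv_and_eq_zero {s i : Nat} : (s &&& (1 <<< i) == 0) = (!s.testBit i) := by
  rw [pv_shift_eq, Nat.and_two_pow]
  cases h : s.testBit i <;> simp [h, (Nat.two_pow_pos i).ne']

-- ---- mod lemma ----
theorem pv_mod_mod_add {edge : Int} (hedge : 0 < edge) (a b : Int) :
    PySem.Int.mod (PySem.Int.mod a edge + b) edge = PySem.Int.mod (a + b) edge := by
  rw [PySem.Int.mod_eq_emod_of_pos hedge, PySem.Int.mod_eq_emod_of_pos hedge,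
    PySem.Int.mod_eq_emod_of_pos hedge, Int.emod_add_emod]

-- ---- pvSum lemmas ----
theorem pvSum_zero (ms : List Int) : pvSum ms 0 = 0 := by
  simp [pvSum]

theorem pvSum_or {ms : List Int} {s i : Nat} (hi : i < ms.length) (hb : s.testBit i = false) :
    pvSum ms (s ||| (1 <<< i)) = pvSum ms s + ms[i]! := by
  unfold pvSum
  have hmem : i ∈ Finset.range ms.length := Finset.mem_range.mpr hi
  rw [← Finset.sum_erase_add _ _ hmem, ← Finset.sum_erase_add _ _ hmem]
  have hcong : ∀ j ∈ (Finset.range ms.length).erase i,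
      (if (s ||| (1 <<< i)).testBit j then ms[j]! else 0) = (if s.testBit j then ms[j]! else 0) := by
    intro j hj
    have hne : ¬ i = j := fun h => (Finset.mem_erase.mp hj).1 (h ▸ rfl)
    simp [Nat.testBit_or, pv_shift_eq, Nat.testBit_two_pow, hne]
  rw [Finset.sum_congr rfl hcong]
  simp [pv_testBit_or_self, hb]

theorem pvSum_full (ms : List Int) : pvSum ms (1 <<< ms.length - 1) = ms.sum := by
  unfold pvSum
  calc (∑ i ∈ Finset.range ms.length, if (1 <<< ms.length - 1).testBit i then ms[i]! else 0)
      = ∑ i ∈ Finset.range ms.length, ms[i]! := by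
        apply Finset.sum_congr rfl
        intro j hj
        simp [pv_shift_eq, Nat.testBit_two_pow_sub_one, Finset.mem_range.mp hj]
    _ = ∑ i : Fin ms.length, ms[(i : Nat)]! :=
        (Fin.sum_univ_eq_sum_range (fun j => ms[j]!) ms.length).symm
    _ = ∑ i : Fin ms.length, ms[i] := by
        apply Finset.sum_congr rfl
        intro j _
        simp [List.getElem!_eq_getElem?_getD, List.getElem?_eq_getElem j.isLt]
    _ = ms.sum := Fin.sum_univ_getElem ms

-- ---- enumeration lemmas ----
theorem mem_pvEnumFrom_iff {xs : List Int} {k : Nat} {p : Nat × Int} :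
    p ∈ pvEnumFrom k xs ↔ ∃ j, j < xs.length ∧ p = (k + j, xs[j]!) := by
  induction xs generalizing k with
  | nil => simp [pvEnumFrom]
  | cons x xs ih =>
    simp only [pvEnumFrom, List.mem_cons, ih]
    constructor
    · rintro (rfl | ⟨j, hj, rfl⟩)
      · exact ⟨0, by simp⟩
      · exact ⟨j + 1, by simpa using hj, by rw [show k + (j + 1) = k + 1 + j by omega]; simp⟩
    · rintro ⟨j, hj, rfl⟩
      cases j with
      | zero => left; simp
      | succ j => right; exact ⟨j, by simpa using hj, by rw [show k + (j + 1) = k + 1 + j by omega]; simp⟩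

theorem pvEnum_entry {ms : List Int} {p : Nat × Int} (h : p ∈ pvEnumFrom 0 ms) :
    p.1 < ms.length ∧ p.2 = ms[p.1]! := by
  rcases mem_pvEnumFrom_iff.mp h with ⟨j, hj, rfl⟩
  simpa using hj

theorem pvEnum_complete {ms : List Int} {i : Nat} (hi : i < ms.length) :
    (i, ms[i]!) ∈ pvEnumFrom 0 ms :=
  mem_pvEnumFrom_iff.mpr ⟨i, hi, by simp⟩

-- ---- A-side: characterization of the inner loop ----
def pvFire (dp : List Int) (edge : Int) (s : Nat) (p : Nat × Int) : Prop :=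
  s.testBit p.1 = true ∧ dp[s ^^^ (1 <<< p.1)]! ≠ -1 ∧ dp[s ^^^ (1 <<< p.1)]! + p.2 ≤ edge

theorem pv_not_fire {dp : List Int} {edge : Int} {s i : Nat} {num : Int}
    (hf : ¬ (dp[s ^^^ (1 <<< i)]! ≠ -1 ∧ dp[s ^^^ (1 <<< i)]! + num ≤ edge)) :
    ¬ pvFire dp edge s (i, num) := fun h => hf ⟨h.2.1, h.2.2⟩

theorem pvInnerA_none_iff {dp : List Int} {edge : Int} {s : Nat} {l : List (Nat × Int)} :
    pvInnerA dp edge s l = none ↔ ∀ p ∈ l, ¬ pvFire dp edge s p := by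
  induction l with
  | nil => simp [pvInnerA]
  | cons p rest ih =>
    obtain ⟨i, num⟩ := p
    rw [pvInnerA, pv_and_eq_zero]
    cases hb : s.testBit i with
    | false =>
      simp only [Bool.not_false, if_true, ih, List.mem_cons]
      constructor
      · rintro h p (rfl | hp)
        · exact fun hfire => by simp [pvFire, hb] at hfire
        · exact h p hp
      · intro h p hp; exact h p (Or.inr hp)
    | true =>
      simp only [Bool.not_true, Bool.false_eq_true, if_false]
      split_ifs with hf
      · constructor
        · intro h; exact absurd h (by simp)
        · intro h; exact absurd ⟨hb, hf.1, hf.2⟩ (h (i, num) List.mem_cons_self)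
      · rw [ih]
        constructor
        · intro h p hp
          rcases List.mem_cons.mp hp with rfl | hp'
          · exact pv_not_fire hf
          · exact h p hp'
        · intro h p hp; exact h p (List.mem_cons_of_mem _ hp)

theorem pvInnerA_some {dp : List Int} {edge : Int} {s : Nat} {l : List (Nat × Int)} {v : Int}
    (h : pvInnerA dp edge s l = some v) :
    ∃ p ∈ l, pvFire dp edge s p ∧ v = PySem.Int.mod (dp[s ^^^ (1 <<< p.1)]! + p.2) edge := by
  induction l with
  | nil => simp [pvInnerA] at h
  | cons p rest ih =>
    obtain ⟨i, num⟩ := p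
    rw [pvInnerA, pv_and_eq_zero] at h
    cases hb : s.testBit i with
    | false =>
      rw [hb] at h
      simp only [Bool.not_false, if_true] at h
      obtain ⟨q, hq, hfire, hv⟩ := ih h
      exact ⟨q, List.mem_cons_of_mem _ hq, hfire, hv⟩
    | true =>
      rw [hb] at h
      simp only [Bool.not_true, Bool.false_eq_true, if_false] at h
      split_ifs at h with hf
      · refine ⟨(i, num), List.mem_cons_self, ⟨hb, hf.1, hf.2⟩, ?_⟩
        exact (Option.some_inj.mp h).symm
      · obtain ⟨q, hq, hfire, hv⟩ := ih h
        exact ⟨q, List.mem_cons_of_mem _ hq, hfire, hv⟩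

-- invariant of A's dp list after processing states 1..m
def DPgood (ms : List Int) (edge : Int) (m : Nat) (dp : List Int) : Prop :=
  dp.length = 1 <<< ms.length ∧
  ∀ t : Nat, t < 1 <<< ms.length →
    (t ≤ m → (PvReach ms edge t → dp[t]! = PySem.Int.mod (pvSum ms t) edge) ∧
             (¬ PvReach ms edge t → dp[t]! = -1)) ∧
    (m < t → dp[t]! = -1)

theorem pv_get_set_self {l : List Int} {i : Nat} {v : Int} (h : i < l.length) :
    (l.set i v)[i]! = v := by
  simp [List.getElem?_set_self, h]

theorem pv_get_set_ne {l : List Int} {i t : Nat} {v : Int} (h : t ≠ i) :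
    (l.set i v)[t]! = l[t]! := by
  simp [List.getElem!_eq_getElem?_getD, List.getElem?_set_ne (Ne.symm h)]

theorem pv_get_replicate {n i : Nat} (h : i < n) : (List.replicate n (-1 : Int))[i]! = -1 := by
  simp [List.getElem?_replicate, h]

theorem pv_mod_zero {edge : Int} (hedge : 0 < edge) : PySem.Int.mod 0 edge = 0 := by
  rw [PySem.Int.mod_eq_emod_of_pos hedge, Int.zero_emod]

theorem dpgood_init (ms : List Int) (edge : Int) (hedge : 0 < edge) :
    DPgood ms edge 0 ((List.replicate (1 <<< ms.length) (-1 : Int)).set 0 0) := by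
  have hpos : 0 < 1 <<< ms.length := by
    rw [pv_shift_eq]; exact Nat.two_pow_pos ms.length
  refine ⟨by simp, ?_⟩
  intro t ht
  constructor
  · intro ht0
    have : t = 0 := by omega
    subst this
    have hget : ((List.replicate (1 <<< ms.length) (-1 : Int)).set 0 0)[0]! = 0 :=
      pv_get_set_self (by simpa using hpos)
    exact ⟨fun _ => by rw [hget, pvSum_zero, pv_mod_zero hedge],
      fun hnr => absurd PvReach.zero hnr⟩
  · intro ht0
    rw [pv_get_set_ne (by omega), pv_get_replicate ht]

theorem dpgood_step (ms : List Int) (edge : Int) (hedge : 0 < edge) {dp : List Int} {s : Nat}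
    (h : DPgood ms edge (s - 1) dp) (h1 : 1 ≤ s) (hs : s < 1 <<< ms.length) :
    DPgood ms edge s
      (match pvInnerA dp edge s (pvEnumFrom 0 ms) with
       | some v => dp.set s v
       | none => dp) := by
  obtain ⟨hlen, hinv⟩ := h
  cases hres : pvInnerA dp edge s (pvEnumFrom 0 ms) with
  | none =>
    have hforall := pvInnerA_none_iff.mp hres
    have hnr : ¬ PvReach ms edge s := by
      intro hr
      cases hr with
      | zero => omega
      | @step s' i hi hb hr' hc =>
        have hbit : (s' ||| (1 <<< i)).testBit i = true := pv_testBit_or_self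
        have hpre : (s' ||| (1 <<< i)) ^^^ (1 <<< i) = s' := pv_xor_cancel hb
        have hlt : s' < s' ||| (1 <<< i) := pv_lt_or hb
        have hs' : s' < 1 <<< ms.length := lt_trans hlt hs
        have hdp : dp[s']! = PySem.Int.mod (pvSum ms s') edge :=
          ((hinv s' hs').1 (by omega)).1 hr'
        have hmodnn : 0 ≤ PySem.Int.mod (pvSum ms s') edge := PySem.Int.mod_nonneg _ hedge
        refine hforall _ (pvEnum_complete hi) ⟨hbit, ?_, ?_⟩
        · rw [hpre, hdp]; omega
        · rw [hpre, hdp]; exact hc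
    refine ⟨hlen, ?_⟩
    intro t ht
    refine ⟨?_, fun hst => (hinv t ht).2 (by omega)⟩
    intro hts
    by_cases hts' : t ≤ s - 1
    · exact (hinv t ht).1 hts'
    · have : t = s := by omega
      subst this
      exact ⟨fun hr => absurd hr hnr, fun _ => (hinv t ht).2 (by omega)⟩
  | some v =>
    obtain ⟨⟨i, num⟩, hmem, hfire, hv⟩ := pvInnerA_some hres
    obtain ⟨hi, hnum⟩ := pvEnum_entry hmem
    obtain ⟨hbit, hne, hle⟩ := hfire
    simp only at hbit hne hle hv hi hnum
    have hpres : s ^^^ (1 <<< i) < s := pv_xor_lt hbit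
    have hpre_size : s ^^^ (1 <<< i) < 1 <<< ms.length := lt_trans hpres hs
    have hreachpre : PvReach ms edge (s ^^^ (1 <<< i)) := by
      by_contra hnr
      exact hne (((hinv _ hpre_size).1 (by omega)).2 hnr)
    have hdp : dp[s ^^^ (1 <<< i)]! = PySem.Int.mod (pvSum ms (s ^^^ (1 <<< i))) edge :=
      ((hinv _ hpre_size).1 (by omega)).1 hreachpre
    have hbpre : (s ^^^ (1 <<< i)).testBit i = false := by
      rw [pv_xor_testBit, hbit]; rfl
    have hor : (s ^^^ (1 <<< i)) ||| (1 <<< i) = s := pv_or_xor_cancel hbit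
    have hreach_s : PvReach ms edge s := by
      have hstep := PvReach.step hi hbpre hreachpre (by rw [← hdp]; rw [hnum] at hle; exact hle)
      rwa [hor] at hstep
    have hvv : v = PySem.Int.mod (pvSum ms s) edge := by
      rw [hv, hdp, hnum, pv_mod_mod_add hedge, ← pvSum_or hi hbpre, hor]
    refine ⟨by simpa using hlen, ?_⟩
    intro t ht
    constructor
    · intro hts
      by_cases hteq : t = s
      · subst hteq
        rw [pv_get_set_self (by omega)]
        exact ⟨fun _ => hvv, fun hnr => absurd hreach_s hnr⟩
      · rw [pv_get_set_ne hteq]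
        exact (hinv t ht).1 (by omega)
    · intro hst
      rw [pv_get_set_ne (by omega)]
      exact (hinv t ht).2 (by omega)

theorem dpgood_fold (ms : List Int) (edge : Int) (hedge : 0 < edge) :
    ∀ (cnt a : Nat) (dp : List Int), DPgood ms edge (a - 1) dp → 1 ≤ a →
      a + cnt ≤ 1 <<< ms.length →
      DPgood ms edge (a + cnt - 1)
        ((List.range' a cnt).foldl
          (fun dp s =>
            match pvInnerA dp edge s (pvEnumFrom 0 ms) with
            | some v => dp.set s v
            | none => dp) dp) := by
  intro cnt
  induction cnt with
  | zero => intro a dp h h1 _; simpa using h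
  | succ cnt ih =>
    intro a dp h h1 hle
    rw [List.range'_succ, List.foldl_cons]
    have := ih (a + 1) _ (dpgood_step ms edge hedge (by simpa using h) h1 (by omega))
      (by omega) (by omega)
    simpa [show a + 1 + cnt - 1 = a + (cnt + 1) - 1 by omega] using this

-- ---- B-side: correctness of the memoized DFS ----
def GoodFailed (ms : List Int) (edge : Int) (full : Nat) (failed : PySem.Set Nat) : Prop :=
  ∀ u ∈ failed, ¬ PvReachF ms edge full u

theorem pvLoop_correct (ms : List Int) (edge : Int) (hedge : 0 < edge) (fuel : Nat)
    (IH : ∀ (failed : PySem.Set Nat) (used : Nat) (cur : Int),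
      used < 2 ^ ms.length → 2 ^ ms.length - used ≤ fuel →
      cur = PySem.Int.mod (pvSum ms used) edge →
      GoodFailed ms edge (2 ^ ms.length - 1) failed →
      ((pvDfs ms edge (2 ^ ms.length - 1) fuel failed used cur).1 = true ↔
        PvReachF ms edge (2 ^ ms.length - 1) used) ∧
      GoodFailed ms edge (2 ^ ms.length - 1) (pvDfs ms edge (2 ^ ms.length - 1) fuel failed used cur).2) :
    ∀ (l : List (Nat × Int)) (failed : PySem.Set Nat) (used : Nat) (cur : Int),
      (∀ p ∈ l, p.1 < ms.length ∧ p.2 = ms[p.1]!) →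
      used < 2 ^ ms.length → used ≠ 2 ^ ms.length - 1 →
      2 ^ ms.length - 1 - used ≤ fuel →
      cur = PySem.Int.mod (pvSum ms used) edge →
      GoodFailed ms edge (2 ^ ms.length - 1) failed →
      ((pvLoop ms edge (2 ^ ms.length - 1) fuel failed used cur l).1 = true ↔
        ∃ p ∈ l, (used.testBit p.1 = false ∧ cur + p.2 ≤ edge ∧
          PvReachF ms edge (2 ^ ms.length - 1) (used ||| (1 <<< p.1)))) ∧
      GoodFailed ms edge (2 ^ ms.length - 1) (pvLoop ms edge (2 ^ ms.length - 1) fuel failed used cur l).2 := by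
  intro l
  induction l with
  | nil =>
    intro failed used cur _ _ _ _ _ hgf
    rw [pvLoop]
    exact ⟨by simp, hgf⟩
  | cons p rest ih =>
    obtain ⟨i, m⟩ := p
    intro failed used cur hent hused hne hfuel hcur hgf
    have hi : i < ms.length := (hent (i, m) List.mem_cons_self).1
    have hm : m = ms[i]! := (hent (i, m) List.mem_cons_self).2
    rw [pvLoop]
    by_cases hcond : (used &&& (1 <<< i) == 0 && decide (cur + m ≤ edge)) = true
    · rw [if_pos hcond]
      obtain ⟨hcond1, hcond2⟩ := Bool.and_eq_true_iff.mp hcond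
      have hb : used.testBit i = false := by
        rw [pv_and_eq_zero] at hcond1; simpa using hcond1
      have hle : cur + m ≤ edge := of_decide_eq_true hcond2
      have hchild_lt : used ||| (1 <<< i) < 2 ^ ms.length := pv_or_lt_two_pow hused hi
      have hgt : used < used ||| (1 <<< i) := pv_lt_or hb
      have hfuel' : 2 ^ ms.length - (used ||| (1 <<< i)) ≤ fuel := by omega
      have hcur' : PySem.Int.mod (cur + m) edge
          = PySem.Int.mod (pvSum ms (used ||| (1 <<< i))) edge := by
        rw [hcur, hm, pv_mod_mod_add hedge, pvSum_or hi hb]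
      obtain ⟨hiff, hgf'⟩ := IH failed (used ||| (1 <<< i)) (PySem.Int.mod (cur + m) edge)
        hchild_lt hfuel' hcur' hgf
      cases hres : pvDfs ms edge (2 ^ ms.length - 1) fuel failed (used ||| (1 <<< i))
          (PySem.Int.mod (cur + m) edge) with
      | mk b failed' =>
        rw [hres] at hiff hgf'
        cases b with
        | true =>
          refine ⟨?_, hgf'⟩
          constructor
          · intro _
            exact ⟨(i, m), List.mem_cons_self, hb, hle, hiff.mp rfl⟩
          · intro _; rfl
        | false =>
          have hnc : ¬ PvReachF ms edge (2 ^ ms.length - 1) (used ||| (1 <<< i)) := by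
            intro hr
            simpa using hiff.mpr hr
          obtain ⟨hiff2, hgf2⟩ := ih failed' used cur
            (fun p hp => hent p (List.mem_cons_of_mem _ hp)) hused hne hfuel hcur hgf'
          refine ⟨?_, hgf2⟩
          rw [hiff2]
          constructor
          · rintro ⟨q, hq, hqc⟩
            exact ⟨q, List.mem_cons_of_mem _ hq, hqc⟩
          · rintro ⟨q, hq, h1, h2, h3⟩
            rcases List.mem_cons.mp hq with heq | hq'
            · exfalso; subst heq; exact hnc h3
            · exact ⟨q, hq', h1, h2, h3⟩
    · rw [if_neg hcond]
      obtain ⟨hiff2, hgf2⟩ := ih failed used cur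
        (fun p hp => hent p (List.mem_cons_of_mem _ hp)) hused hne hfuel hcur hgf
      refine ⟨?_, hgf2⟩
      rw [hiff2]
      constructor
      · rintro ⟨q, hq, hqc⟩
        exact ⟨q, List.mem_cons_of_mem _ hq, hqc⟩
      · rintro ⟨q, hq, h1, h2, h3⟩
        rcases List.mem_cons.mp hq with heq | hq'
        · exfalso
          subst heq
          simp only at h1 h2
          apply hcond
          rw [Bool.and_eq_true_iff, pv_and_eq_zero, h1]
          exact ⟨rfl, decide_eq_true h2⟩
        · exact ⟨q, hq', h1, h2, h3⟩

theorem pvDfs_correct (ms : List Int) (edge : Int) (hedge : 0 < edge) :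
    ∀ (fuel : Nat) (failed : PySem.Set Nat) (used : Nat) (cur : Int),
      used < 2 ^ ms.length → 2 ^ ms.length - used ≤ fuel →
      cur = PySem.Int.mod (pvSum ms used) edge →
      GoodFailed ms edge (2 ^ ms.length - 1) failed →
      ((pvDfs ms edge (2 ^ ms.length - 1) fuel failed used cur).1 = true ↔
        PvReachF ms edge (2 ^ ms.length - 1) used) ∧
      GoodFailed ms edge (2 ^ ms.length - 1) (pvDfs ms edge (2 ^ ms.length - 1) fuel failed used cur).2 := by
  intro fuel
  induction fuel with
  | zero =>
    intro failed used cur hused hfuel _ _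
    exact absurd hfuel (by omega)
  | succ fuel IH =>
    intro failed used cur hused hfuel hcur hgf
    rw [pvDfs]
    by_cases hfull : used = 2 ^ ms.length - 1
    · have hbeq : (used == 2 ^ ms.length - 1) = true := beq_iff_eq.mpr hfull
      rw [hbeq]
      exact ⟨⟨fun _ => hfull ▸ PvReachF.done, fun _ => rfl⟩, hgf⟩
    · have hbeq : (used == 2 ^ ms.length - 1) = false := by
        simpa using hfull
      rw [hbeq]
      simp only [Bool.false_eq_true, if_false]
      by_cases hmemb : PySem.Set.contains failed used = true
      · rw [if_pos hmemb]
        have hnr : ¬ PvReachF ms edge (2 ^ ms.length - 1) used :=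
          hgf used ((PySem.Set.contains_iff failed used).mp hmemb)
        exact ⟨⟨fun habs => by simp at habs, fun hr => absurd hr hnr⟩, hgf⟩
      · rw [if_neg hmemb]
        have hfuel' : 2 ^ ms.length - 1 - used ≤ fuel := by omega
        obtain ⟨hiff, hgf'⟩ := pvLoop_correct ms edge hedge fuel IH (pvEnumFrom 0 ms)
          failed used cur (fun p hp => pvEnum_entry hp) hused hfull hfuel' hcur hgf
        cases hres : pvLoop ms edge (2 ^ ms.length - 1) fuel failed used cur (pvEnumFrom 0 ms) with
        | mk b failed' =>
          rw [hres] at hiff hgf'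
          cases b with
          | true =>
            refine ⟨⟨fun _ => ?_, fun _ => rfl⟩, hgf'⟩
            obtain ⟨⟨i, m⟩, hq, h1, h2, h3⟩ := hiff.mp rfl
            obtain ⟨hi, hm⟩ := pvEnum_entry hq
            simp only at h1 h2 h3 hi hm
            refine PvReachF.step hi h1 ?_ h3
            rw [← hcur, ← hm]
            exact h2
          | false =>
            have hnr : ¬ PvReachF ms edge (2 ^ ms.length - 1) used := by
              intro hr
              cases hr with
              | done => exact hfull rfl
              | @step s i hi hb hc hr' =>
                refine absurd (hiff.mpr ⟨(i, ms[i]!), pvEnum_complete hi, hb, ?_, hr'⟩)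
                  (by simp)
                rw [hcur]
                exact hc
            refine ⟨⟨fun habs => by simp at habs, fun hr => absurd hr hnr⟩, ?_⟩
            intro u hu
            rcases (PySem.Set.mem_add failed' used u).mp hu with hu' | rfl
            · exact hgf' u hu'
            · exact hnr

-- ---- the two reachability predicates decide the same question ----
theorem pv_reach_to_reachF {ms : List Int} {edge : Int} {full s : Nat}
    (h : PvReach ms edge s) : PvReachF ms edge full s → PvReachF ms edge full 0 := by
  induction h with
  | zero => exact id
  | step hi hb hr hc ih => exact fun h' => ih (PvReachF.step hi hb hc h')

theorem pv_reachF_to_reach {ms : List Int} {edge : Int} {full s : Nat}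
    (h : PvReachF ms edge full s) : PvReach ms edge s → PvReach ms edge full := by
  induction h with
  | done => exact id
  | step hi hb hc hr ih => exact fun h' => ih (PvReach.step hi hb h' hc)

theorem pv_pyGetD_neg_one {l : List Int} (h : l ≠ []) :
    PySem.List.pyGetD l (-1) 0 = l[l.length - 1]! := by
  have hl : 0 < l.length := List.length_pos_iff.mpr h
  have h1 : ¬ (0 : Int) ≤ -1 := by omega
  have h2 : -(l.length : Int) ≤ -1 := by omega
  simp only [PySem.List.pyGetD, PySem.List.pyGet?, PySem.List.pyIdx?, if_neg h1, if_pos h2]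
  rw [show ((-(-1 : Int)).toNat) = 1 by decide]
  have hlt : l.length - 1 < l.length := by omega
  simp [List.getElem?_eq_getElem hlt, List.getElem!_eq_getElem?_getD]

theorem pv_main (ms : List Int) (hpos : 0 < ms.sum)
    (hmod : PySem.Int.mod ms.sum 4 = 0) : makesquare_2 ms = makesquare_2_alt ms := by
  have hmod' : ¬ PySem.Int.mod ms.sum 4 ≠ 0 := not_not.mpr hmod
  have hsize : (1 : Nat) <<< ms.length = 2 ^ ms.length := pv_shift_eq ms.length
  have hpos2 : 0 < 2 ^ ms.length := Nat.two_pow_pos ms.length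
  simp only [makesquare_2, makesquare_2_alt, if_neg hmod']
  set edge := PySem.Int.floordiv ms.sum 4 with hedge_def
  have htot : edge * 4 + PySem.Int.mod ms.sum 4 = ms.sum := PySem.Int.floordiv_mul_add_mod ms.sum 4
  rw [hmod] at htot
  have hedge : 0 < edge := by omega
  -- A side: the dp list after the fold
  set dpF := (List.range' 1 (1 <<< ms.length - 1)).foldl
      (fun dp s => match pvInnerA dp edge s (pvEnumFrom 0 ms) with
        | some v => dp.set s v
        | none => dp)
      ((List.replicate (1 <<< ms.length) (-1 : Int)).set 0 0) with hdpF
  have hfold := dpgood_fold ms edge hedge (1 <<< ms.length - 1) 1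
      ((List.replicate (1 <<< ms.length) (-1 : Int)).set 0 0)
      (dpgood_init ms edge hedge) le_rfl (by omega)
  rw [show 1 + (1 <<< ms.length - 1) - 1 = 1 <<< ms.length - 1 by omega] at hfold
  rw [← hdpF] at hfold
  obtain ⟨hlen, hinv⟩ := hfold
  have hfull_lt : 1 <<< ms.length - 1 < 1 <<< ms.length := by omega
  have hchar := (hinv _ hfull_lt).1 le_rfl
  have hnonnil : dpF ≠ [] := by
    intro hnil; rw [hnil] at hlen; simp at hlen; omega
  have hpy : PySem.List.pyGetD dpF (-1) 0 = dpF[1 <<< ms.length - 1]! := by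
    rw [pv_pyGetD_neg_one hnonnil, hlen]
  -- B side: the memoized DFS decides PvReachF
  obtain ⟨hiffB, -⟩ := pvDfs_correct ms edge hedge (1 <<< ms.length) PySem.Set.empty 0 0
    hpos2 (by omega) (by rw [pvSum_zero, pv_mod_zero hedge])
    (by intro u hu; simp [PySem.Set.empty] at hu)
  rw [← hsize] at hiffB
  -- the full mask's dp value is 0 when reachable
  have hmodte : PySem.Int.mod (pvSum ms (1 <<< ms.length - 1)) edge = 0 := by
    rw [pvSum_full, PySem.Int.mod_eq_emod_of_pos hedge, show ms.sum = edge * 4 by omega,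
      Int.mul_emod_right]
  by_cases hr : PvReach ms edge (1 <<< ms.length - 1)
  · have hval : dpF[1 <<< ms.length - 1]! = 0 := by rw [hchar.1 hr, hmodte]
    have hB : (pvDfs ms edge (1 <<< ms.length - 1) (1 <<< ms.length) PySem.Set.empty 0 0).1 = true := by
      rw [hiffB]
      exact pv_reach_to_reachF hr PvReachF.done
    rw [hpy, hval, hB]
    rfl
  · have hval : dpF[1 <<< ms.length - 1]! = -1 := hchar.2 hr
    have hB : (pvDfs ms edge (1 <<< ms.length - 1) (1 <<< ms.length) PySem.Set.empty 0 0).1 = false := by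
      cases hb : (pvDfs ms edge (1 <<< ms.length - 1) (1 <<< ms.length) PySem.Set.empty 0 0).1 with
      | false => rfl
      | true =>
        exact absurd (pv_reachF_to_reach (hiffB.mp hb) PvReach.zero) hr
    rw [hpy, hval, hB]
    rfl

-- ===== VERDICT (by name: the statement is the Claim_ definition above) =====
theorem makesquare_2_spec : Claim_equal_makesquare_2 := by
  unfold Claim_equal_makesquare_2
  intro ms _ hpre
  unfold Spec_makesquare_2
  by_cases hmod : PySem.Int.mod ms.sum 4 ≠ 0
  · simp only [makesquare_2, makesquare_2_alt, if_pos hmod]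
  · rcases hpre with rfl | hpos | hne
    · -- empty list: both sides are True
      have h0 : ¬ PySem.Int.mod (List.sum ([] : List Int)) 4 ≠ 0 := by
        rw [List.sum_nil, pv_mod_zero (by omega : (0 : Int) < 4)]
        omega
      simp only [makesquare_2, makesquare_2_alt, List.length_nil, if_neg h0]
      have hone : (1 : Nat) <<< 0 = 1 := rfl
      rw [hone]
      have hdfs : pvDfs [] (PySem.Int.floordiv (List.sum ([] : List Int)) 4) (1 - 1) 1
          PySem.Set.empty 0 0 = (true, PySem.Set.empty) := by
        rw [show (1 : Nat) = 0 + 1 from rfl, pvDfs]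
        rfl
      rw [hdfs]
      norm_num
      rfl
    · exact pv_main ms hpos (not_not.mp hmod)
    · exact absurd (not_not.mp hmod) hne
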